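-- pv_equiv track=rewrite | github.com/songzy12/HackerRank | Algorithms/Strings/separate_the_numbers.py | check
-- ===== SOURCE A (Python) =====
-- def check(s, num):
--     i = 0
--     while i < len(s):
--         l = len(str(num))
--         if s[i:i + l] != str(num):
--             return False
--         num += 1
--         i += l
--     return i == len(s)
-- ===== SOURCE B (Python) =====
-- def check(s, num):
--     expected = ''
--     n = num
--     while len(expected) < len(s):
--         expected += str(n)
--         n += 1
--     return expected == s
-- ===== Notes on version B (the rewrite author's own statement) =====
-- stated objective: simpler
-- what changed: Instead of scanning s by index and checking each chunk against str(num) with a per-chunk early return, B builds the expected concatenation str(num)+str(num+1)+... until it is at least as long as s and returns one final string equality; no index arithmetic and no early exits.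
import Mathlib
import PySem

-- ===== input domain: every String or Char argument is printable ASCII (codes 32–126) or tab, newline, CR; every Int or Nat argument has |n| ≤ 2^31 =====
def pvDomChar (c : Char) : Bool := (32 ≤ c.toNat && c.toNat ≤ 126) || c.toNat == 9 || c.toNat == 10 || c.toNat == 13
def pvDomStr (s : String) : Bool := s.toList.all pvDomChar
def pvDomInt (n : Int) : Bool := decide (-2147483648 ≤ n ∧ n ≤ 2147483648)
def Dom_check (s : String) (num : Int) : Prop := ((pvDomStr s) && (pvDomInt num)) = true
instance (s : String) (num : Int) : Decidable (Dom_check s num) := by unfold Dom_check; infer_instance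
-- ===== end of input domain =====

-- B replaces A's index-chunk scan with building the expected concatenation once and one
-- final equality test (objective: simpler; same linear cost).

-- termination helper for both ports (str(n) is never empty), cited by their decreasing_by
theorem pv_toDigitsCore_len (b : Nat) :
    ∀ (f n : Nat) (l : List Char), l.length < (Nat.toDigitsCore b (f+1) n l).length := by
  intro f
  induction f with
  | zero => intro n l; simp only [Nat.toDigitsCore]; split <;> simp
  | succ f ih =>
    intro n l
    rw [Nat.toDigitsCore]
    split
    · simp
    · exact Nat.lt_trans (by simp) (ih (n / b) (Nat.digitChar (n % b) :: l))

theorem pv_toChars_len_pos (n : Int) : 0 < (PySem.Int.toChars n).length := by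
  unfold PySem.Int.toChars Nat.toDigits
  split
  · simp
  · exact pv_toDigitsCore_len 10 _ _ []

-- ===== PORT A =====
-- A's while loop: index i, chunk s[i:i+l] compared against str(num), early return False
def checkLoopA (cs : List Char) (i : Nat) (num : Int) : Bool :=
  if i < cs.length then
    if PySem.List.slice cs (some (i : Int)) (some ((i : Int) + ((PySem.Int.toChars num).length : Int)))
        ≠ PySem.Int.toChars num then false
    else checkLoopA cs (i + (PySem.Int.toChars num).length) (num + 1)
  else decide (i = cs.length)
termination_by cs.length - i
decreasing_by have := pv_toChars_len_pos num; omega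

def check (s : String) (num : Int) : Bool := checkLoopA s.toList 0 num

-- ===== PORT B =====
-- B's while loop: grow expected by str(n) while shorter than s, then one equality test
def buildLoopB (cs : List Char) (acc : List Char) (n : Int) : Bool :=
  if acc.length < cs.length then buildLoopB cs (acc ++ PySem.Int.toChars n) (n + 1)
  else decide (acc = cs)
termination_by cs.length - acc.length
decreasing_by simp only [List.length_append]; have := pv_toChars_len_pos n; omega

def check_alt (s : String) (num : Int) : Bool := buildLoopB s.toList [] num

-- ===== PRECONDITION & SPEC =====
def Spec_check (s : String) (num : Int) (out : Bool) : Prop := out = check_alt s num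
instance (s : String) (num : Int) (out : Bool) : Decidable (Spec_check s num out) := by unfold Spec_check; infer_instance

-- ===== CLAIM (what is proved, stated in full; the proofs are below) =====
def Claim_equal_check : Prop := ∀ (s : String) (num : Int), Dom_check s num → Spec_check s num (check s num)

-- ===== LEMMAS AND PROOFS =====

-- the full expected concatenation covering at least L characters (proof-only device)
def restChain (n : Int) (L : Nat) : List Char :=
  if L = 0 then [] else PySem.Int.toChars n ++ restChain (n + 1) (L - (PySem.Int.toChars n).length)
termination_by L
decreasing_by have := pv_toChars_len_pos n; omega

theorem checkLoopA_eq (cs : List Char) :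
    ∀ (k i : Nat) (num : Int), cs.length - i ≤ k → i ≤ cs.length →
      checkLoopA cs i num = decide (restChain num (cs.length - i) = cs.drop i) := by
  intro k
  induction k with
  | zero =>
    intro i num hk hi
    have hie : i = cs.length := by omega
    subst hie
    rw [checkLoopA]
    simp [restChain]
  | succ k ih =>
    intro i num hk hi
    rw [checkLoopA]
    by_cases hlt : i < cs.length
    · simp only [hlt, if_true]
      have hl := pv_toChars_len_pos num
      set d := PySem.Int.toChars num with hd
      have hslice : PySem.List.slice cs (some (i : Int)) (some ((i : Int) + (d.length : Int)))
          = (cs.drop i).take d.length := PySem.List.slice_natCast_add cs i d.length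
      have hL0 : cs.length - i ≠ 0 := by omega
      rw [hslice, restChain, if_neg hL0, ← hd]
      by_cases heq : (cs.drop i).take d.length = d
      · -- matching chunk: peel it off on both sides and recurse
        have hlen : d.length ≤ cs.length - i := by
          have := congrArg List.length heq
          simp at this
          omega
        have hdrop : cs.drop i = d ++ cs.drop (i + d.length) := by
          conv_lhs => rw [← List.take_append_drop d.length (cs.drop i)]
          rw [heq, List.drop_drop, Nat.add_comm]
        have harith : cs.length - i - d.length = cs.length - (i + d.length) := by omega
        rw [if_neg (not_not_intro heq),
            ih (i + d.length) (num + 1) (by omega) (by omega), hdrop, harith]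
        simp only [decide_eq_decide]
        exact ⟨fun h => by rw [h], fun h => List.append_cancel_left h⟩
      · -- mismatching chunk: both sides are false
        rw [if_pos heq]
        symm
        simp only [decide_eq_false_iff_not]
        intro habs
        apply heq
        have h2 := congrArg (List.take d.length) habs
        rw [List.take_left] at h2
        exact h2.symm
    · have hie : i = cs.length := by omega
      subst hie
      rw [if_neg hlt]
      simp [restChain]

theorem buildLoopB_eq (cs : List Char) :
    ∀ (k : Nat) (acc : List Char) (n : Int), cs.length - acc.length ≤ k →
      buildLoopB cs acc n = decide (acc ++ restChain n (cs.length - acc.length) = cs) := by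
  intro k
  induction k with
  | zero =>
    intro acc n hk
    have h0 : cs.length - acc.length = 0 := by omega
    rw [buildLoopB, h0]
    have : ¬ acc.length < cs.length := by omega
    rw [if_neg this]
    simp [restChain]
  | succ k ih =>
    intro acc n hk
    rw [buildLoopB]
    by_cases hlt : acc.length < cs.length
    · rw [if_pos hlt]
      have hl := pv_toChars_len_pos n
      set d := PySem.Int.toChars n with hd
      have hL0 : cs.length - acc.length ≠ 0 := by omega
      have harith : cs.length - (acc ++ d).length = cs.length - acc.length - d.length := by
        simp; omega
      rw [restChain, if_neg hL0, ← hd, ih (acc ++ d) (n + 1) (by simp; omega), harith,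
        List.append_assoc]
    · rw [if_neg hlt]
      have h0 : cs.length - acc.length = 0 := by omega
      rw [h0]
      simp [restChain]

-- ===== VERDICT (by name: the statement is the Claim_ definition above) =====
theorem check_spec : Claim_equal_check := by
  intro s num _
  unfold Spec_check check check_alt
  rw [checkLoopA_eq s.toList s.toList.length 0 num (by omega) (by omega),
      buildLoopB_eq s.toList s.toList.length [] num (by simp)]
  simp
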